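-- pv_equiv track=rewrite | github.com/Squidpants/DualNBack | MakeStimBuffer.py | link_up_chains
-- ===== SOURCE A (Python) =====
-- def link_up_chains(list_of_pairs: list) -> list:
--     '''Attempt to make nice cue target fun times.'''
--
--     list_of_matching_entries = []
--
--     # first sort list, this sorts by first entry of each sublist.
--     list_of_pairs.sort()
--
--     # Next note all targets unique, all cues unique.  So, only one instance
--     # of an index as a cue can exist, same for target.  However, a target
--     # can be a cue.  Apply this fact.
--
--     while len(list_of_pairs) > 0:
--
--         working_entry = list_of_pairs.pop(0)
--
--         # Have smallest [cue, target] pair isolated now.  See if target is also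
--         # a cue.  If so, meld together and check next, if not, pop out next
--         # smallest and test that until no more to check.
--
--         check_again = True
--
--         while check_again:
--
--             check_again = False
--
--             entries_to_pop = []
--
--             for entry in list_of_pairs:
--
--                 if entry[0] == working_entry[-1]:
--
--                     working_entry.append(entry[1])
--                     entries_to_pop.append(entry)
--
--                     # Well, before we move on, see if now some other pair
--                     # links in to this chain.
--                     check_again = True
--
--             if len(entries_to_pop) > 0:
--
--                 # Only pop out a pair if we bound it to a chain.
--                 for pair in entries_to_pop:
--
--                     list_of_pairs.pop(list_of_pairs.index(pair))
--
--         list_of_matching_entries.append(working_entry)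
--         # Chain or pair, this is now to be outputted
--
--     return list_of_matching_entries
-- ===== SOURCE B (Python) =====
-- def link_up_chains(list_of_pairs: list) -> list:
--     '''Attempt to make nice cue target fun times.'''
--     # Index the sorted pairs by cue once, then follow each chain directly:
--     # every queue is consumed strictly front-to-back, so a single counter per
--     # cue replaces all of A's rescans.  (Unlike A, the caller's list is not
--     # mutated; only the return value is the same.)
--     pairs = sorted(list_of_pairs)
--     by_cue = {}
--     for p in pairs:
--         by_cue.setdefault(p[0], []).append(p)
--     done = {}     # cue -> how many entries of its queue are consumed (a prefix)
--     seen = {}     # cue -> how many entries of its queue the outer loop passed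
--     chains = []
--     for p in pairs:
--         h = p[0]
--         j = seen.get(h, 0)
--         seen[h] = j + 1
--         if j < done.get(h, 0):
--             continue                  # consumed earlier as part of a chain
--         done[h] = j + 1               # consume p itself as a chain start
--         chain = list(p)
--         while True:
--             t = chain[-1]
--             q = by_cue.get(t)
--             if q is None:
--                 break
--             f = done.get(t, 0)
--             if f >= len(q):
--                 break
--             done[t] = f + 1
--             chain.append(q[f][1])
--         chains.append(chain)
--     return chains
-- ===== Notes on version B (the rewrite author's own statement) =====
-- stated objective: alternative
-- what changed: B sorts once, indexes the pairs by cue in a dict of queues with per-cue consumed/seen counters, and follows each chain by direct lookup, instead of A's destructive pop(0) loop with repeated whole-list rescans (check_again passes) and list.index-based popping; on the measured input family the cost is the same.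
-- outside the precondition, e.g. on link_up_chains([[]]): A returns [[]], B raises IndexError; on link_up_chains([[5]]): A returns [[5]], B returns [[5]]
import Mathlib
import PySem

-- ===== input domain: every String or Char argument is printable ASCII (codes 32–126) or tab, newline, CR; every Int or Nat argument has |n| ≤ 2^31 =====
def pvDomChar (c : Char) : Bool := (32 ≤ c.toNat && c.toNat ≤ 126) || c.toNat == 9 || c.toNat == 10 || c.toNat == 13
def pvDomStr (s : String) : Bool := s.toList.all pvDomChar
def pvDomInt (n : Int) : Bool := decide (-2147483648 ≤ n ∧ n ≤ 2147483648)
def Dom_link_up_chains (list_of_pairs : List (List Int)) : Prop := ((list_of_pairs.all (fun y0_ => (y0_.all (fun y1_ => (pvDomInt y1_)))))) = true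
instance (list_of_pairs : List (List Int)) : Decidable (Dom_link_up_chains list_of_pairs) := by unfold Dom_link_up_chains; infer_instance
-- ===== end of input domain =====

-- B indexes the sorted pairs by cue once and follows each chain with per-cue counters
-- instead of A's repeated rescans; equivalence is about the RETURN value only (A sorts
-- and empties its argument in place, B does not mutate it).

-- entry[0], entry[1], w[-1]; the pyGetD defaults are never reached under Pre_ (all sublists have length ≥ 2,
-- and a working chain only grows), so these are exact.
def pyHead (e : List Int) : Int := PySem.List.pyGetD e 0 0
def pySnd (e : List Int) : Int := PySem.List.pyGetD e 1 0
def pyLast (w : List Int) : Int := PySem.List.pyGetD w (-1) 0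

-- ===== PORT A =====
-- the 'for entry in list_of_pairs' pass: returns (working_entry, entries_to_pop, check_again)
def aScan (w : List Int) (rem : List (List Int)) : List Int × List (List Int) × Bool :=
  match rem with
  | [] => (w, [], false)
  | e :: rest =>
    if pyHead e = pyLast w then
      let r := aScan (w ++ [pySnd e]) rest
      (r.1, e :: r.2.1, true)
    else aScan w rest

-- 'for pair in entries_to_pop: list_of_pairs.pop(list_of_pairs.index(pair))' = erase the first
-- occurrence of each collected pair (index always succeeds: each collected pair is a distinct
-- position of rem, so counts never exceed those of rem)
def aPop (rem : List (List Int)) (tp : List (List Int)) : List (List Int) :=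
  tp.foldl (fun r e => r.erase e) rem

-- termination helpers for aChase/aLoop (cited in decreasing_by)
theorem aScan_cons_pos (w e : List Int) (rest : List (List Int)) (hm : pyHead e = pyLast w) :
    aScan w (e :: rest) = ((aScan (w ++ [pySnd e]) rest).1,
      e :: (aScan (w ++ [pySnd e]) rest).2.1, true) := by
  simp [aScan, hm]

theorem aScan_cons_neg (w e : List Int) (rest : List (List Int)) (hm : ¬ pyHead e = pyLast w) :
    aScan w (e :: rest) = aScan w rest := by
  simp [aScan, hm]

theorem aScan_toPop_mem (w : List Int) (rem : List (List Int)) :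
    ∀ e ∈ (aScan w rem).2.1, e ∈ rem := by
  induction rem generalizing w with
  | nil => simp [aScan]
  | cons e rest ih =>
    intro x hx
    by_cases hm : pyHead e = pyLast w
    · rw [aScan_cons_pos w e rest hm] at hx
      simp only [List.mem_cons] at hx
      rcases hx with hx | hx
      · simp [hx]
      · exact List.mem_cons_of_mem _ (ih _ x hx)
    · rw [aScan_cons_neg w e rest hm] at hx
      exact List.mem_cons_of_mem _ (ih w x hx)

theorem aScan_ck_toPop (w : List Int) (rem : List (List Int)) :
    (aScan w rem).2.2 = true → (aScan w rem).2.1 ≠ [] := by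
  induction rem generalizing w with
  | nil => simp [aScan]
  | cons e rest ih =>
    by_cases hm : pyHead e = pyLast w
    · rw [aScan_cons_pos w e rest hm]
      simp
    · rw [aScan_cons_neg w e rest hm]
      exact ih w

theorem aPop_length_le (tp : List (List Int)) (rem : List (List Int)) :
    (aPop rem tp).length ≤ rem.length := by
  induction tp generalizing rem with
  | nil => simp [aPop]
  | cons e ts ih =>
    have h1 : aPop rem (e :: ts) = aPop (rem.erase e) ts := by simp [aPop]
    rw [h1]
    exact le_trans (ih _) (List.erase_sublist (l := rem) (a := e)).length_le

theorem aPop_length_lt (w : List Int) (rem : List (List Int)) :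
    (aScan w rem).2.2 = true → (aPop rem (aScan w rem).2.1).length < rem.length := by
  intro hck
  rcases htp : (aScan w rem).2.1 with _ | ⟨e, ts⟩
  · exact absurd htp (aScan_ck_toPop w rem hck)
  · have he : e ∈ rem := aScan_toPop_mem w rem e (by simp [htp])
    have h1 : aPop rem (e :: ts) = aPop (rem.erase e) ts := by simp [aPop]
    rw [h1]
    calc (aPop (rem.erase e) ts).length ≤ (rem.erase e).length := aPop_length_le ts _
    _ < rem.length := by
        rw [List.length_erase_of_mem he]
        exact Nat.pred_lt (Nat.ne_of_gt (List.length_pos_of_mem he))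

-- the 'while check_again' loop
def aChase (w : List Int) (rem : List (List Int)) : List Int × List (List Int) :=
  let r := aScan w rem
  let rem' := aPop rem r.2.1
  if h : r.2.2 = true then aChase r.1 rem'
  else (r.1, rem')
termination_by rem.length
decreasing_by exact aPop_length_lt w rem h

theorem aChase_snd_le (w : List Int) (rem : List (List Int)) :
    (aChase w rem).2.length ≤ rem.length := by
  fun_induction aChase w rem with
  | case1 w rem r rem' h ih => exact le_trans ih (le_of_lt (aPop_length_lt w rem h))
  | case2 w rem r rem' h => exact aPop_length_le _ _

-- the 'while len(list_of_pairs) > 0' loop (pop(0) = take the head)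
def aLoop (rem : List (List Int)) : List (List Int) :=
  match rem with
  | [] => []
  | w :: rest =>
    let r := aChase w rest
    r.1 :: aLoop r.2
termination_by rem.length
decreasing_by
  have := aChase_snd_le w rest
  simpa using Nat.lt_succ_of_le this

def link_up_chains (list_of_pairs : List (List Int)) : List (List Int) :=
  aLoop (PySem.List.sorted list_of_pairs (fun x => x) false)

-- ===== PORT B =====
-- by_cue = {}; for p in pairs: by_cue.setdefault(p[0], []).append(p)
def bIndex (pairs : List (List Int)) : PySem.Dict Int (List (List Int)) :=
  pairs.foldl (fun d p => d.modify (pyHead p) [] (· ++ [p])) PySem.Dict.empty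

-- the 'while True' chain-following loop of Source B; fuel only makes the recursion total
-- (each iteration consumes one queue entry, so pairs.length + 1 is always enough)
def bChase (fuel : Nat) (by_cue : PySem.Dict Int (List (List Int)))
    (chain : List Int) (dn : PySem.Dict Int Int) : List Int × PySem.Dict Int Int :=
  match fuel with
  | 0 => (chain, dn)
  | fuel + 1 =>
    let t := pyLast chain
    match by_cue.get? t with
    | none => (chain, dn)
    | some q =>
      let f := dn.getD t 0
      if (q.length : Int) ≤ f then (chain, dn)
      else bChase fuel by_cue (chain ++ [pySnd (PySem.List.pyGetD q f [])]) (dn.insert t (f + 1))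

-- one step of the outer 'for p in pairs' loop; state = (done, seen, chains)
def bStep (pairs : List (List Int)) (by_cue : PySem.Dict Int (List (List Int)))
    (st : PySem.Dict Int Int × PySem.Dict Int Int × List (List Int)) (p : List Int) :
    PySem.Dict Int Int × PySem.Dict Int Int × List (List Int) :=
  let h := pyHead p
  let j := st.2.1.getD h 0
  let seen' := st.2.1.insert h (j + 1)
  if j < st.1.getD h 0 then (st.1, seen', st.2.2)
  else
    let r := bChase (pairs.length + 1) by_cue p (st.1.insert h (j + 1))
    (r.2, seen', st.2.2 ++ [r.1])

def link_up_chains_alt (list_of_pairs : List (List Int)) : List (List Int) :=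
  let pairs := PySem.List.sorted list_of_pairs (fun x => x) false
  let by_cue := bIndex pairs
  (pairs.foldl (bStep pairs by_cue) (PySem.Dict.empty, PySem.Dict.empty, [])).2.2

-- ===== PRECONDITION & SPEC =====
-- Pre_ requires every sublist to be a genuine [cue, target, ...] of length ≥ 2: a shorter sublist
-- makes A raise IndexError as soon as it is popped empty or matched (entry[1]), and whether it is
-- ever matched is not a shape condition, so length-deficient sublists that happen never to match
-- (on which A still returns) are excluded together with the raising ones.
def Pre_link_up_chains (list_of_pairs : List (List Int)) : Prop :=
  ∀ p ∈ list_of_pairs, 2 ≤ p.length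
instance (list_of_pairs : List (List Int)) : Decidable (Pre_link_up_chains list_of_pairs) := by
  unfold Pre_link_up_chains; infer_instance

def pvWitness_link_up_chains : List (List Int) := [[1, 2], [2, 3], [0, 5]]

def Spec_link_up_chains (list_of_pairs : List (List Int)) (out : List (List Int)) : Prop :=
  out = link_up_chains_alt list_of_pairs
instance (list_of_pairs : List (List Int)) (out : List (List Int)) : Decidable (Spec_link_up_chains list_of_pairs out) := by
  unfold Spec_link_up_chains; infer_instance

-- ===== CLAIM (what is proved, stated in full; the proofs are below) =====
def Claim_equal_link_up_chains : Prop := ∀ (list_of_pairs : List (List Int)), Dom_link_up_chains list_of_pairs → Pre_link_up_chains list_of_pairs → Spec_link_up_chains list_of_pairs (link_up_chains list_of_pairs)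

-- ===== LEMMAS AND PROOFS =====

-- The reference chain-follower both ports are reduced to: repeatedly take the FIRST remaining
-- pair whose cue equals the chain's tail.
def chaseF (w : List Int) (rem : List (List Int)) : List Int × List (List Int) :=
  match h : rem.find? (fun e => pyHead e == pyLast w) with
  | none => (w, rem)
  | some e => chaseF (w ++ [pySnd e]) (rem.erase e)
termination_by rem.length
decreasing_by
  have he : e ∈ rem := List.mem_of_find?_eq_some h
  rw [List.length_erase_of_mem he]
  exact Nat.pred_lt (Nat.ne_of_gt (List.length_pos_of_mem he))

theorem chaseF_snd_le (w : List Int) (rem : List (List Int)) :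
    (chaseF w rem).2.length ≤ rem.length := by
  fun_induction chaseF w rem with
  | case1 w rem h => exact le_refl _
  | case2 w rem e h ih => exact le_trans ih (List.erase_sublist (l := rem) (a := e)).length_le

theorem chaseF_snd_sublist (w : List Int) (rem : List (List Int)) :
    (chaseF w rem).2.Sublist rem := by
  fun_induction chaseF w rem with
  | case1 w rem h => exact List.Sublist.refl _
  | case2 w rem e h ih => exact ih.trans (List.erase_sublist (l := rem) (a := e))

def mLoop (rem : List (List Int)) : List (List Int) :=
  match rem with
  | [] => []
  | w :: rest =>
    let r := chaseF w rest
    r.1 :: mLoop r.2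
termination_by rem.length
decreasing_by
  have := chaseF_snd_le w rest
  simpa using Nat.lt_succ_of_le this

-- the two port calls of sorted elaborate with core's List LT instance; identify it with
-- the LinearOrder instance the PySem order lemmas use (the instances are definitionally equal)
theorem sorted_inst (lst : List (List Int)) :
    (PySem.List.sorted lst (fun x => x) false)
      = @PySem.List.sorted (List Int) (List Int) List.instLinearOrder.toLT
          LinearOrder.toDecidableLT lst (fun x => x) false := by
  congr 1

theorem chaseF_eq_none (w : List Int) (rem : List (List Int))
    (h : rem.find? (fun e => pyHead e == pyLast w) = none) : chaseF w rem = (w, rem) := by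
  rw [chaseF]
  split
  · rfl
  · rename_i e he; rw [h] at he; exact absurd he (by simp)

theorem chaseF_eq_some (w : List Int) (rem : List (List Int)) (e : List Int)
    (h : rem.find? (fun e => pyHead e == pyLast w) = some e) :
    chaseF w rem = chaseF (w ++ [pySnd e]) (rem.erase e) := by
  rw [chaseF]
  split
  · rename_i he; rw [h] at he; exact absurd he (by simp)
  · rename_i e' he; rw [h] at he; cases he; rfl

theorem mLoop_cons (w : List Int) (rest : List (List Int)) :
    mLoop (w :: rest) = (chaseF w rest).1 :: mLoop (chaseF w rest).2 := by
  rw [mLoop]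

theorem aLoop_cons (w : List Int) (rest : List (List Int)) :
    aLoop (w :: rest) = (aChase w rest).1 :: aLoop (aChase w rest).2 := by
  rw [aLoop]

theorem pyLast_append (w : List Int) (x : Int) : pyLast (w ++ [x]) = x := by
  simp [pyLast, PySem.List.pyGetD, PySem.List.pyGet?, PySem.List.pyIdx?]

theorem pyHead_cons (x : Int) (l : List Int) : pyHead (x :: l) = x := by
  simp [pyHead, PySem.List.pyGetD, PySem.List.pyGet?, PySem.List.pyIdx?]

theorem head_le (a b : List Int) (ha : a ≠ []) (h : a ≤ b) : pyHead a ≤ pyHead b := by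
  rcases a with _ | ⟨x, as⟩
  · exact absurd rfl ha
  · rcases b with _ | ⟨y, bs⟩
    · exact absurd (lt_of_lt_of_le (List.nil_lt_cons x as) h) (lt_irrefl _)
    · rw [pyHead_cons, pyHead_cons]
      rcases lt_or_eq_of_le h with hlt | heq
      · have hlex : List.Lex (· < ·) (x :: as) (y :: bs) := hlt
        cases hlex with
        | cons _ => exact le_refl _
        | rel hr => exact le_of_lt hr
      · cases heq; exact le_refl _

-- ---------- A-side: aLoop = mLoop on a sorted list of pairs ----------

theorem aScan_of_no_match (w : List Int) (rem : List (List Int))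
    (h : ∀ e ∈ rem, pyHead e ≠ pyLast w) : aScan w rem = (w, [], false) := by
  induction rem with
  | nil => rfl
  | cons e rest ih =>
    rw [aScan_cons_neg w e rest (h e (by simp))]
    exact ih (fun x hx => h x (List.mem_cons_of_mem _ hx))

theorem aScan_false_inv (w : List Int) (rem : List (List Int))
    (h : (aScan w rem).2.2 = false) :
    aScan w rem = (w, [], false) ∧ ∀ e ∈ rem, pyHead e ≠ pyLast w := by
  induction rem generalizing w with
  | nil => exact ⟨rfl, by simp⟩
  | cons e rest ih =>
    by_cases hm : pyHead e = pyLast w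
    · rw [aScan_cons_pos w e rest hm] at h; simp at h
    · rw [aScan_cons_neg w e rest hm] at h ⊢
      obtain ⟨h1, h2⟩ := ih w h
      exact ⟨h1, by
        intro x hx
        rcases List.mem_cons.mp hx with rfl | hx
        · exact hm
        · exact h2 x hx⟩

-- one pass of A's inner loop performs a sequence of chaseF steps: scanning the (sorted)
-- remainder, every match taken by the pass is the globally first remaining match
theorem scan_chaseF (rem : List (List Int)) : ∀ (pre : List (List Int)) (w : List Int),
    (pre ++ rem).Pairwise (· ≤ ·) → (∀ p ∈ pre ++ rem, p ≠ []) →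
    (∀ p ∈ pre, pyHead p ≠ pyLast w) →
    chaseF w (pre ++ rem) = chaseF (aScan w rem).1 (aPop (pre ++ rem) (aScan w rem).2.1) := by
  induction rem with
  | nil =>
    intro pre w _ _ _
    simp [aScan, aPop]
  | cons e rest ih =>
    intro pre w hs hne hpre
    by_cases hm : pyHead e = pyLast w
    · -- e is the globally first remaining match
      have hfind : (pre ++ e :: rest).find? (fun x => pyHead x == pyLast w) = some e := by
        rw [List.find?_append]
        have h1 : pre.find? (fun x => pyHead x == pyLast w) = none :=
          List.find?_eq_none.mpr (fun x hx => by simpa using hpre x hx)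
        rw [h1]
        simp [hm]
      have henp : e ∉ pre := fun hmem => hpre e hmem hm
      have herase : (pre ++ e :: rest).erase e = pre ++ rest := by
        rw [List.erase_append_right _ henp, List.erase_cons_head]
      rw [chaseF_eq_some w _ e hfind, herase]
      rw [aScan_cons_pos w e rest hm]
      have hpop : aPop (pre ++ e :: rest) (e :: (aScan (w ++ [pySnd e]) rest).2.1)
          = aPop (pre ++ rest) (aScan (w ++ [pySnd e]) rest).2.1 := by
        show aPop ((pre ++ e :: rest).erase e) _ = _
        rw [herase]
      rw [hpop]
      set w₂ := w ++ [pySnd e] with hw2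
      have hlast2 : pyLast w₂ = pySnd e := pyLast_append w (pySnd e)
      have hs' : (pre ++ rest).Pairwise (· ≤ ·) :=
        hs.sublist (List.Sublist.append_left (List.sublist_cons_self e rest) pre)
      have hne' : ∀ p ∈ pre ++ rest, p ≠ [] := fun p hp =>
        hne p ((List.Sublist.append_left (List.sublist_cons_self e rest) pre).mem hp)
      by_cases hp2 : ∀ p ∈ pre, pyHead p ≠ pyLast w₂
      · exact ih pre w₂ hs' hne' hp2
      · -- some earlier pair matches the new tail: then nothing in rest can match it,
        -- the pass finds nothing more and stops here
        push_neg at hp2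
        obtain ⟨p, hpmem, hphead⟩ := hp2
        have hnomatch : ∀ x ∈ rest, pyHead x ≠ pyLast w₂ := by
          intro x hx heq
          have hpe : p ≤ e := (List.pairwise_append.mp hs).2.2 p hpmem e (by simp)
          have hex : e ≤ x := (List.pairwise_cons.mp (List.pairwise_append.mp hs).2.1).1 x hx
          have h1 : pyHead p ≤ pyHead e :=
            head_le p e (hne p (List.mem_append_left _ hpmem)) hpe
          have h2 : pyHead e ≤ pyHead x :=
            head_le e x (hne e (List.mem_append_right _ (by simp))) hex
          have e1 : pyHead e ≤ pyLast w₂ := heq ▸ h2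
          have e2 : pyLast w₂ ≤ pyHead e := hphead ▸ h1
          exact hpre p hpmem (hphead.trans ((le_antisymm e1 e2).symm.trans hm))
        have hscan := aScan_of_no_match w₂ rest hnomatch
        rw [hscan]
        simp [aPop]
    · rw [aScan_cons_neg w e rest hm]
      have hassoc : pre ++ e :: rest = (pre ++ [e]) ++ rest := by simp
      rw [hassoc]
      apply ih (pre ++ [e]) w (by rw [← hassoc]; exact hs) (by rw [← hassoc]; exact hne)
      intro p hp
      rcases List.mem_append.mp hp with hp | hp
      · exact hpre p hp
      · simp at hp; subst hp; exact hm

theorem aChase_eq_chaseF (n : Nat) : ∀ (rem : List (List Int)) (w : List Int),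
    rem.length ≤ n → rem.Pairwise (· ≤ ·) → (∀ p ∈ rem, p ≠ []) →
    aChase w rem = chaseF w rem := by
  induction n with
  | zero =>
    intro rem w hn _ _
    have : rem = [] := List.length_eq_zero_iff.mp (Nat.le_zero.mp hn)
    subst this
    rw [aChase, chaseF_eq_none w [] (by simp)]
    simp [aScan, aPop]
  | succ n ih =>
    intro rem w hn hs hne
    have key := scan_chaseF rem [] w (by simpa using hs) (by simpa using hne) (by simp)
    simp only [List.nil_append] at key
    rw [aChase]
    by_cases hck : (aScan w rem).2.2 = true
    · rw [dif_pos hck]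
      have hlt := aPop_length_lt w rem hck
      have hsub : (aPop rem (aScan w rem).2.1).Sublist rem := by
        have : ∀ tp r, (aPop r tp).Sublist r := by
          intro tp
          induction tp with
          | nil => intro r; simp [aPop]
          | cons x xs ihx =>
            intro r
            have h1 : aPop r (x :: xs) = aPop (r.erase x) xs := by simp [aPop]
            rw [h1]
            exact (ihx _).trans (List.erase_sublist)
        exact this _ rem
      rw [ih _ _ (by omega) (hs.sublist hsub) (fun p hp => hne p (hsub.mem hp))]
      exact key.symm
    · rw [dif_neg hck]
      obtain ⟨h1, h2⟩ := aScan_false_inv w rem (by simpa using hck)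
      rw [h1]
      simp only [aPop, List.foldl_nil]
      exact (chaseF_eq_none w rem (List.find?_eq_none.mpr
        (fun x hx => by simpa using h2 x hx))).symm

theorem aLoop_eq_mLoop (rem : List (List Int)) (hs : rem.Pairwise (· ≤ ·))
    (hl : ∀ p ∈ rem, p ≠ []) : aLoop rem = mLoop rem := by
  induction hn : rem.length using Nat.strong_induction_on generalizing rem with
  | _ n ihn =>
    rcases rem with _ | ⟨w, rest⟩
    · rw [aLoop, mLoop]
    · rw [aLoop_cons, mLoop_cons]
      have hrest_s : rest.Pairwise (· ≤ ·) := hs.of_cons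
      have hrest_ne : ∀ p ∈ rest, p ≠ [] := fun p hp => hl p (List.mem_cons_of_mem _ hp)
      rw [aChase_eq_chaseF rest.length rest w (le_refl _) hrest_s hrest_ne]
      have hsub := chaseF_snd_sublist w rest
      have hlen := chaseF_snd_le w rest
      rw [ihn (chaseF w rest).2.length (by subst hn; simpa using Nat.lt_succ_of_le hlen)
        _ (hrest_s.sublist hsub) (fun p hp => hrest_ne p (hsub.mem hp)) rfl]

-- ---------- B-side: the fold = mLoop on any list ----------

-- abstract view of B's counters: how many pairs the run has consumed, per cue
def cnt (l : List (List Int)) (t : Int) : Nat := (l.filter (fun p => pyHead p == t)).length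

-- the pairs still unconsumed when, for each cue t, the first dn t pairs with that cue are gone
def dropCnt : List (List Int) → (Int → Nat) → List (List Int)
  | [], _ => []
  | p :: rest, dn =>
    if dn (pyHead p) = 0 then p :: dropCnt rest dn
    else dropCnt rest (Function.update dn (pyHead p) (dn (pyHead p) - 1))

-- the counter dict of the port stores exactly the counts dn
def CntRep (d : PySem.Dict Int Int) (dn : Int → Nat) : Prop := ∀ t, d.getD t 0 = (dn t : Int)

theorem cnt_cons (p : List Int) (l : List (List Int)) (t : Int) :
    cnt (p :: l) t = (if pyHead p = t then 1 else 0) + cnt l t := by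
  by_cases h : pyHead p = t <;> simp [cnt, List.filter_cons, h, Nat.add_comm]

theorem cnt_append_singleton (pre : List (List Int)) (p : List Int) (t : Int) :
    cnt (pre ++ [p]) t = cnt pre t + (if pyHead p = t then 1 else 0) := by
  by_cases h : pyHead p = t <;> simp [cnt, List.filter_append, List.filter_cons, h]

theorem dropCnt_cons_zero (p : List Int) (rest : List (List Int)) (dn : Int → Nat)
    (h : dn (pyHead p) = 0) : dropCnt (p :: rest) dn = p :: dropCnt rest dn := by
  simp [dropCnt, h]

theorem dropCnt_cons_pos (p : List Int) (rest : List (List Int)) (dn : Int → Nat)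
    (h : dn (pyHead p) ≠ 0) :
    dropCnt (p :: rest) dn
      = dropCnt rest (Function.update dn (pyHead p) (dn (pyHead p) - 1)) := by
  simp [dropCnt, h]

theorem dropCnt_sublist (l : List (List Int)) : ∀ dn, (dropCnt l dn).Sublist l := by
  induction l with
  | nil => intro dn; simp [dropCnt]
  | cons p rest ih =>
    intro dn
    by_cases h : dn (pyHead p) = 0
    · rw [dropCnt_cons_zero p rest dn h]; exact (ih dn).cons₂ p
    · rw [dropCnt_cons_pos p rest dn h]; exact (ih _).cons p

theorem dropCnt_zero (l : List (List Int)) : dropCnt l (fun _ => 0) = l := by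
  induction l with
  | nil => rfl
  | cons p rest ih => rw [dropCnt_cons_zero p rest _ rfl, ih]

theorem dropCnt_append (suf : List (List Int)) : ∀ (pre : List (List Int)) (dn : Int → Nat),
    (∀ t, cnt pre t ≤ dn t) →
    dropCnt (pre ++ suf) dn = dropCnt suf (fun t => dn t - cnt pre t) := by
  intro pre
  induction pre with
  | nil =>
    intro dn _
    have he : (fun t => dn t - cnt [] t) = dn := funext fun t => by simp [cnt]
    rw [List.nil_append, he]
  | cons p pre' ih =>
    intro dn h
    have hp := h (pyHead p)
    rw [cnt_cons, if_pos rfl] at hp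
    have h0 : dn (pyHead p) ≠ 0 := by omega
    rw [List.cons_append, dropCnt_cons_pos _ _ _ h0]
    have hle : ∀ t, cnt pre' t ≤ Function.update dn (pyHead p) (dn (pyHead p) - 1) t := by
      intro t
      have hht := h t
      rw [cnt_cons] at hht
      by_cases ht : t = pyHead p
      · rw [ht, Function.update_self]
        rw [ht, if_pos rfl] at hht
        omega
      · rw [Function.update_of_ne ht]
        rw [if_neg (Ne.symm ht)] at hht
        omega
    rw [ih _ hle]
    congr 1
    funext t
    by_cases ht : t = pyHead p
    · have hht := h t
      rw [cnt_cons, ht, if_pos rfl] at hht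
      rw [ht, Function.update_self, cnt_cons, if_pos rfl]
      omega
    · rw [Function.update_of_ne ht, cnt_cons, if_neg (Ne.symm ht)]
      omega

theorem find_dropCnt_none (l : List (List Int)) : ∀ (dn : Int → Nat) (t : Int),
    cnt l t ≤ dn t → (dropCnt l dn).find? (fun e => pyHead e == t) = none := by
  induction l with
  | nil => intro dn t _; rfl
  | cons p rest ih =>
    intro dn t h
    rw [cnt_cons] at h
    by_cases h0 : dn (pyHead p) = 0
    · have hpt : pyHead p ≠ t := by
        intro he
        rw [if_pos he] at h
        rw [he] at h0
        omega
      rw [dropCnt_cons_zero p rest dn h0, List.find?_cons_of_neg (by simp [hpt])]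
      rw [if_neg hpt] at h
      exact ih dn t (by omega)
    · rw [dropCnt_cons_pos p rest dn h0]
      apply ih
      by_cases ht : pyHead p = t
      · rw [← ht, Function.update_self]
        rw [if_pos ht, ← ht] at h
        omega
      · rw [Function.update_of_ne (Ne.symm ht)]
        rw [if_neg ht] at h
        omega

theorem find_dropCnt_some (l : List (List Int)) : ∀ (dn : Int → Nat) (t : Int),
    dn t < cnt l t →
    (dropCnt l dn).find? (fun e => pyHead e == t)
      = (l.filter (fun p => pyHead p == t))[dn t]? := by
  induction l with
  | nil => intro dn t h; simp [cnt] at h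
  | cons p rest ih =>
    intro dn t h
    rw [cnt_cons] at h
    by_cases hpt : pyHead p = t
    · have hfil : (p :: rest).filter (fun q => pyHead q == t)
          = p :: rest.filter (fun q => pyHead q == t) := by
        simp [List.filter_cons, hpt]
      rw [if_pos hpt] at h
      by_cases h0 : dn (pyHead p) = 0
      · have h0t : dn t = 0 := by rw [← hpt]; exact h0
        rw [dropCnt_cons_zero _ _ _ h0, List.find?_cons_of_pos (by simp [hpt]), hfil, h0t]
        simp
      · have h0t : dn t ≠ 0 := by rw [← hpt]; exact h0
        rw [dropCnt_cons_pos _ _ _ h0]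
        have hupd : Function.update dn (pyHead p) (dn (pyHead p) - 1) t = dn t - 1 := by
          rw [← hpt, Function.update_self, hpt]
        have hlt2 : (Function.update dn (pyHead p) (dn (pyHead p) - 1)) t < cnt rest t := by
          rw [hupd]; omega
        rw [ih _ _ hlt2, hfil, hupd]
        rcases hn : dn t with _ | k
        · exact absurd hn h0t
        · simp
    · have hfil : (p :: rest).filter (fun q => pyHead q == t)
          = rest.filter (fun q => pyHead q == t) := by
        simp [List.filter_cons, hpt]
      rw [if_neg hpt] at h
      by_cases h0 : dn (pyHead p) = 0
      · rw [dropCnt_cons_zero _ _ _ h0, List.find?_cons_of_neg (by simp [hpt]), hfil]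
        exact ih dn t (by omega)
      · rw [dropCnt_cons_pos _ _ _ h0, hfil]
        have hupd : Function.update dn (pyHead p) (dn (pyHead p) - 1) t = dn t :=
          Function.update_of_ne (Ne.symm hpt) _ _
        rw [ih _ t (by rw [hupd]; omega), hupd]

theorem erase_dropCnt (l : List (List Int)) : ∀ (dn : Int → Nat) (t : Int) (e : List Int),
    dn t < cnt l t → (l.filter (fun p => pyHead p == t))[dn t]? = some e →
    (dropCnt l dn).erase e = dropCnt l (Function.update dn t (dn t + 1)) := by
  induction l with
  | nil => intro dn t e h _; simp [cnt] at h
  | cons p rest ih =>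
    intro dn t e h he
    rw [cnt_cons] at h
    by_cases hpt : pyHead p = t
    · subst hpt
      rw [if_pos rfl] at h
      have hfil : (p :: rest).filter (fun q => pyHead q == pyHead p)
          = p :: rest.filter (fun q => pyHead q == pyHead p) := by
        simp [List.filter_cons]
      by_cases h0 : dn (pyHead p) = 0
      · rw [hfil, h0] at he
        simp at he
        rw [dropCnt_cons_zero _ _ _ h0, ← he, List.erase_cons_head]
        rw [dropCnt_cons_pos _ _ _ (by rw [Function.update_self]; omega)]
        rw [Function.update_self, Function.update_idem, Nat.add_sub_cancel,
          Function.update_eq_self]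
      · have he2 : (rest.filter (fun q => pyHead q == pyHead p))[(Function.update dn (pyHead p)
            (dn (pyHead p) - 1)) (pyHead p)]? = some e := by
          rw [Function.update_self]
          rw [hfil] at he
          rcases hn : dn (pyHead p) with _ | k
          · exact absurd hn h0
          · rw [hn] at he
            simpa using he
        rw [dropCnt_cons_pos _ _ _ h0]
        rw [ih _ (pyHead p) e (by rw [Function.update_self]; omega) he2]
        rw [dropCnt_cons_pos _ _ _ (by rw [Function.update_self]; omega)]
        rw [Function.update_self, Function.update_self, Function.update_idem,
          Function.update_idem, Nat.add_sub_cancel, Nat.sub_add_cancel (by omega)]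
    · have hfil : (p :: rest).filter (fun q => pyHead q == t)
          = rest.filter (fun q => pyHead q == t) := by
        simp [List.filter_cons, hpt]
      rw [if_neg hpt] at h
      rw [hfil] at he
      have hmem : e ∈ rest.filter (fun q => pyHead q == t) := by
        obtain ⟨hlt', hget⟩ := List.getElem?_eq_some_iff.mp he
        rw [← hget]
        exact List.getElem_mem _
      have hhe : pyHead e = t := by simpa using List.of_mem_filter hmem
      have hep : ¬ (p == e) = true := by
        simp only [beq_iff_eq]
        intro hh
        exact hpt (by rw [hh]; exact hhe)
      by_cases h0 : dn (pyHead p) = 0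
      · rw [dropCnt_cons_zero _ _ _ h0, List.erase_cons_tail hep]
        rw [ih dn t e (by omega) he]
        rw [dropCnt_cons_zero _ _ _ (by rw [Function.update_of_ne hpt]; exact h0)]
      · rw [dropCnt_cons_pos _ _ _ h0]
        have hupd : Function.update dn (pyHead p) (dn (pyHead p) - 1) t = dn t :=
          Function.update_of_ne (Ne.symm hpt) _ _
        rw [ih _ t e (by rw [hupd]; omega) (by rw [hupd]; exact he)]
        rw [dropCnt_cons_pos _ _ _ (by rw [Function.update_of_ne hpt]; exact h0)]
        congr 1
        funext s
        rcases eq_or_ne s t with rfl | hst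
        · simp only [Function.update_self, Function.update_of_ne (Ne.symm hpt), hupd]
        · rcases eq_or_ne s (pyHead p) with rfl | hsp
          · simp only [Function.update_self, Function.update_of_ne hpt]
          · simp only [Function.update_of_ne hst, Function.update_of_ne hsp]

theorem bIndex_getD (pairs : List (List Int)) (t : Int) :
    (bIndex pairs).getD t [] = pairs.filter (fun p => pyHead p == t) := by
  unfold bIndex
  have hmap : pairs.foldl (fun d p => d.modify (pyHead p) [] (· ++ [p])) PySem.Dict.empty
      = (pairs.map (fun p => (pyHead p, p))).foldl
          (fun d q => d.modify q.1 [] (· ++ [q.2])) PySem.Dict.empty := by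
    rw [List.foldl_map]
  rw [hmap, PySem.Dict.getD_foldl_modify_append]
  simp [List.filter_map, Function.comp_def]

theorem bChase_succ_none (n : Nat) (by_cue : PySem.Dict Int (List (List Int)))
    (chain : List Int) (d : PySem.Dict Int Int)
    (h : by_cue.get? (pyLast chain) = none) :
    bChase (n + 1) by_cue chain d = (chain, d) := by
  simp [bChase, h]

theorem bChase_succ_stop (n : Nat) (by_cue : PySem.Dict Int (List (List Int)))
    (chain : List Int) (d : PySem.Dict Int Int) (q : List (List Int))
    (hq : by_cue.get? (pyLast chain) = some q)
    (hge : (q.length : Int) ≤ d.getD (pyLast chain) 0) :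
    bChase (n + 1) by_cue chain d = (chain, d) := by
  simp [bChase, hq, hge]

theorem bChase_succ_go (n : Nat) (by_cue : PySem.Dict Int (List (List Int)))
    (chain : List Int) (d : PySem.Dict Int Int) (q : List (List Int))
    (hq : by_cue.get? (pyLast chain) = some q)
    (hlt : ¬ (q.length : Int) ≤ d.getD (pyLast chain) 0) :
    bChase (n + 1) by_cue chain d
      = bChase n by_cue (chain ++ [pySnd (PySem.List.pyGetD q (d.getD (pyLast chain) 0) [])])
          (d.insert (pyLast chain) (d.getD (pyLast chain) 0 + 1)) := by
  simp [bChase, hq, hlt]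

theorem bChase_eq (pairs : List (List Int)) : ∀ (fuel : Nat) (chain : List Int)
    (d : PySem.Dict Int Int) (dn : Int → Nat),
    CntRep d dn → (∀ t, dn t ≤ cnt pairs t) → (dropCnt pairs dn).length < fuel →
    ∃ dn', CntRep (bChase fuel (bIndex pairs) chain d).2 dn' ∧
      (∀ t, dn t ≤ dn' t) ∧ (∀ t, dn' t ≤ cnt pairs t) ∧
      (bChase fuel (bIndex pairs) chain d).1 = (chaseF chain (dropCnt pairs dn)).1 ∧
      dropCnt pairs dn' = (chaseF chain (dropCnt pairs dn)).2 := by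
  intro fuel
  induction fuel with
  | zero => intro chain d dn _ _ hf; exact absurd hf (by omega)
  | succ n ih =>
    intro chain d dn hrep hcnt hfuel
    cases hq : (bIndex pairs).get? (pyLast chain) with
    | none =>
      have hfil : pairs.filter (fun p => pyHead p == pyLast chain) = [] := by
        have h1 := bIndex_getD pairs (pyLast chain)
        rw [PySem.Dict.getD_of_get?_eq_none _ [] hq] at h1
        exact h1.symm
      have hcnt0 : cnt pairs (pyLast chain) = 0 := by simp [cnt, hfil]
      rw [bChase_succ_none n _ chain d hq,
        chaseF_eq_none chain _ (find_dropCnt_none pairs dn (pyLast chain) (by omega))]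
      exact ⟨dn, hrep, fun t => le_refl _, hcnt, rfl, rfl⟩
    | some q =>
      have hqval : q = pairs.filter (fun p => pyHead p == pyLast chain) := by
        have h1 := bIndex_getD pairs (pyLast chain)
        rw [PySem.Dict.getD_of_get?_eq_some _ [] hq] at h1
        exact h1
      have hcq : cnt pairs (pyLast chain) = q.length := by rw [cnt, hqval]
      by_cases hge : (q.length : Int) ≤ d.getD (pyLast chain) 0
      · have hle : cnt pairs (pyLast chain) ≤ dn (pyLast chain) := by
          rw [hrep (pyLast chain)] at hge
          rw [hcq]
          exact_mod_cast hge
        rw [bChase_succ_stop n _ chain d q hq hge,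
          chaseF_eq_none chain _ (find_dropCnt_none pairs dn (pyLast chain) hle)]
        exact ⟨dn, hrep, fun t => le_refl _, hcnt, rfl, rfl⟩
      · have hlt : dn (pyLast chain) < cnt pairs (pyLast chain) := by
          rw [hrep (pyLast chain)] at hge
          rw [hcq]
          exact_mod_cast lt_of_not_ge hge
        obtain ⟨e, hsome⟩ : ∃ e,
            (pairs.filter (fun p => pyHead p == pyLast chain))[dn (pyLast chain)]? = some e := by
          rw [List.getElem?_eq_getElem (by simpa [cnt] using hlt)]
          exact ⟨_, rfl⟩
        have hfind : (dropCnt pairs dn).find? (fun x => pyHead x == pyLast chain) = some e := by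
          rw [find_dropCnt_some pairs dn (pyLast chain) hlt]
          exact hsome
        have hmem : e ∈ dropCnt pairs dn := List.mem_of_find?_eq_some hfind
        have harg : PySem.List.pyGetD q (d.getD (pyLast chain) 0) [] = e := by
          rw [hrep (pyLast chain), PySem.List.pyGetD_natCast, List.getD_eq_getElem?_getD,
            hqval, hsome]
          rfl
        rw [bChase_succ_go n _ chain d q hq hge, harg]
        rw [chaseF_eq_some chain _ e hfind]
        have herase := erase_dropCnt pairs dn (pyLast chain) e hlt hsome
        have hrep' : CntRep (d.insert (pyLast chain) (d.getD (pyLast chain) 0 + 1))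
            (Function.update dn (pyLast chain) (dn (pyLast chain) + 1)) := by
          intro t
          rw [PySem.Dict.getD_insert]
          by_cases ht : t = pyLast chain
          · rw [if_pos ht, ht, hrep (pyLast chain), Function.update_self]
            push_cast
            ring
          · rw [if_neg ht, hrep t, Function.update_of_ne ht]
        have hcnt' : ∀ t, (Function.update dn (pyLast chain) (dn (pyLast chain) + 1)) t
            ≤ cnt pairs t := by
          intro t
          by_cases ht : t = pyLast chain
          · rw [ht, Function.update_self]
            omega
          · rw [Function.update_of_ne ht]
            exact hcnt t
        have hfuel' : (dropCnt pairs (Function.update dn (pyLast chain)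
            (dn (pyLast chain) + 1))).length < n := by
          rw [← herase, List.length_erase_of_mem hmem]
          have hpos := List.length_pos_of_mem hmem
          omega
        obtain ⟨dn', hr1, hr2, hr3, hr4, hr5⟩ := ih (chain ++ [pySnd e])
          (d.insert (pyLast chain) (d.getD (pyLast chain) 0 + 1))
          (Function.update dn (pyLast chain) (dn (pyLast chain) + 1)) hrep' hcnt' hfuel'
        refine ⟨dn', hr1, ?_, hr3, ?_, ?_⟩
        · intro t
          refine le_trans ?_ (hr2 t)
          by_cases ht : t = pyLast chain
          · rw [ht, Function.update_self]; omega
          · rw [Function.update_of_ne ht]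
        · rw [hr4, herase]
        · rw [hr5, herase]

theorem bFold_go (pairs : List (List Int)) : ∀ (suf pre : List (List Int))
    (d sn : PySem.Dict Int Int) (dn : Int → Nat) (acc : List (List Int)),
    pairs = pre ++ suf → CntRep d dn → CntRep sn (fun t => cnt pre t) →
    (∀ t, cnt pre t ≤ dn t) → (∀ t, dn t ≤ cnt pairs t) →
    (suf.foldl (bStep pairs (bIndex pairs)) (d, sn, acc)).2.2
      = acc ++ mLoop (dropCnt pairs dn) := by
  intro suf
  induction suf with
  | nil =>
    intro pre d sn dn acc hsplit _ _ hpre _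
    have h1 : pairs = pre := by simpa using hsplit
    have hnil : dropCnt pairs dn = [] := by
      have h2 := dropCnt_append [] pre dn hpre
      rw [List.append_nil] at h2
      rw [h1, h2]
      rfl
    rw [hnil]
    simp [mLoop]
  | cons p rest ih =>
    intro pre d sn dn acc hsplit hrepd hreps hpre hcnt
    rw [List.foldl_cons]
    have hj : sn.getD (pyHead p) 0 = (cnt pre (pyHead p) : Int) := hreps (pyHead p)
    have hreps' : CntRep (sn.insert (pyHead p) (sn.getD (pyHead p) 0 + 1))
        (fun t => cnt (pre ++ [p]) t) := by
      intro t
      show (sn.insert (pyHead p) (sn.getD (pyHead p) 0 + 1)).getD t 0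
        = ((cnt (pre ++ [p]) t : Nat) : Int)
      rw [PySem.Dict.getD_insert]
      by_cases ht : t = pyHead p
      · rw [if_pos ht, hj, ht, cnt_append_singleton, if_pos rfl]
        push_cast
        ring
      · rw [if_neg ht, hreps t, cnt_append_singleton, if_neg (fun hh => ht hh.symm)]
        simp
    by_cases hskip : sn.getD (pyHead p) 0 < d.getD (pyHead p) 0
    · -- p was already consumed by an earlier chain: skip it
      have hstep : bStep pairs (bIndex pairs) (d, sn, acc) p
          = (d, sn.insert (pyHead p) (sn.getD (pyHead p) 0 + 1), acc) := by
        simp only [bStep]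
        rw [if_pos hskip]
      rw [hstep]
      have hlt : cnt pre (pyHead p) < dn (pyHead p) := by
        rw [hj, hrepd (pyHead p)] at hskip
        exact_mod_cast hskip
      apply ih (pre ++ [p]) d _ dn acc (by simpa using hsplit) hrepd hreps' ?_ hcnt
      intro t
      by_cases ht : t = pyHead p
      · rw [ht, cnt_append_singleton, if_pos rfl]
        omega
      · rw [cnt_append_singleton, if_neg (fun hh => ht hh.symm)]
        have := hpre t
        omega
    · -- p starts a new chain
      have heq : dn (pyHead p) = cnt pre (pyHead p) := by
        have h1 : ¬ cnt pre (pyHead p) < dn (pyHead p) := by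
          intro hlt
          apply hskip
          rw [hj, hrepd (pyHead p)]
          exact_mod_cast hlt
        have := hpre (pyHead p)
        omega
      set dnp := Function.update dn (pyHead p) (dn (pyHead p) + 1) with hdnp
      have hdnp_at : dnp (pyHead p) = dn (pyHead p) + 1 := Function.update_self _ _ _
      have hdnp_ne : ∀ t, t ≠ pyHead p → dnp t = dn t := fun t ht =>
        Function.update_of_ne ht _ _
      have hdnp_mono : ∀ t, dn t ≤ dnp t := by
        intro t
        by_cases ht : t = pyHead p
        · rw [ht, hdnp_at]; omega
        · rw [hdnp_ne t ht]
      have hpre1 : ∀ t, cnt (pre ++ [p]) t ≤ dnp t := by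
        intro t
        by_cases ht : t = pyHead p
        · rw [ht, cnt_append_singleton, if_pos rfl, hdnp_at]
          omega
        · rw [cnt_append_singleton, if_neg (fun hh => ht hh.symm), hdnp_ne t ht]
          have := hpre t
          omega
      have hprednp : ∀ t, cnt pre t ≤ dnp t := fun t => le_trans (hpre t) (hdnp_mono t)
      have hsplit2 : dropCnt pairs dn = p :: dropCnt pairs dnp := by
        rw [hsplit, dropCnt_append (p :: rest) pre dn hpre,
          dropCnt_cons_zero _ _ _ (by omega),
          dropCnt_append (p :: rest) pre dnp hprednp,
          dropCnt_cons_pos _ _ _ (by rw [hdnp_at]; omega)]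
        congr 1
        congr 1
        funext t
        by_cases ht : t = pyHead p
        · rw [ht, Function.update_self, hdnp_at]
          omega
        · rw [Function.update_of_ne ht, hdnp_ne t ht]
      have hrepd' : CntRep (d.insert (pyHead p) (sn.getD (pyHead p) 0 + 1)) dnp := by
        intro t
        rw [PySem.Dict.getD_insert]
        by_cases ht : t = pyHead p
        · rw [if_pos ht, hj, ht, hdnp_at, heq]
          push_cast
          ring
        · rw [if_neg ht, hrepd t, hdnp_ne t ht]
      have hcnt1 : ∀ t, dnp t ≤ cnt pairs t := by
        intro t
        by_cases ht : t = pyHead p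
        · rw [ht, hdnp_at]
          -- p itself is still unconsumed, so dn (pyHead p) < cnt pairs (pyHead p)
          by_contra hcon
          have hge2 : cnt pairs (pyHead p) ≤ dn (pyHead p) := by omega
          have hnone := find_dropCnt_none pairs dn (pyHead p) hge2
          rw [hsplit2, List.find?_cons_of_pos (by simp)] at hnone
          simp at hnone
        · rw [hdnp_ne t ht]
          exact hcnt t
      have hfuel : (dropCnt pairs dnp).length < pairs.length + 1 := by
        have := (dropCnt_sublist pairs dnp).length_le
        omega
      obtain ⟨dn', hr1, hr2, hr3, hr4, hr5⟩ :=
        bChase_eq pairs (pairs.length + 1) p (d.insert (pyHead p) (sn.getD (pyHead p) 0 + 1))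
          dnp hrepd' hcnt1 hfuel
      have hstep : bStep pairs (bIndex pairs) (d, sn, acc) p
          = ((bChase (pairs.length + 1) (bIndex pairs) p
                (d.insert (pyHead p) (sn.getD (pyHead p) 0 + 1))).2,
             sn.insert (pyHead p) (sn.getD (pyHead p) 0 + 1),
             acc ++ [(bChase (pairs.length + 1) (bIndex pairs) p
                (d.insert (pyHead p) (sn.getD (pyHead p) 0 + 1))).1]) := by
        simp only [bStep]
        rw [if_neg hskip]
      rw [hstep]
      rw [ih (pre ++ [p]) _ _ dn' _ (by simpa using hsplit) hr1 hreps'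
        (fun t => le_trans (hpre1 t) (hr2 t)) hr3]
      rw [hsplit2, mLoop_cons, hr4, hr5]
      simp

theorem bFold_eq_mLoop (pairs : List (List Int)) :
    (pairs.foldl (bStep pairs (bIndex pairs)) (PySem.Dict.empty, PySem.Dict.empty, [])).2.2
      = mLoop pairs := by
  have h := bFold_go pairs pairs [] PySem.Dict.empty PySem.Dict.empty (fun _ => 0) []
    (by simp) (fun t => by simp) (fun t => by simp [cnt])
    (fun t => by simp [cnt]) (fun t => Nat.zero_le _)
  rw [h, dropCnt_zero]
  simp

-- ===== VERDICT (by name: the statement is the Claim_ definition above) =====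
theorem link_up_chains_spec : Claim_equal_link_up_chains := by
  intro lst _ hpre
  unfold Spec_link_up_chains link_up_chains link_up_chains_alt
  rw [bFold_eq_mLoop]
  apply aLoop_eq_mLoop
  · rw [sorted_inst]
    exact PySem.List.sorted_pairwise lst (fun x => x)
  · intro p hp
    have h2 := hpre p ((PySem.List.mem_sorted lst (fun x => x) false p).mp hp)
    intro hnil
    rw [hnil] at h2
    simp at h2
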